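-- pv_equiv track=rewrite | github.com/kakaocloud-school-study/coding-test | lim/백트래킹/K개 중 하나를 N번 선택하기(Simple) - 알파벳과 사칙연산.py | get_arrs
-- ===== SOURCE A (Python) =====
-- def get_arrs(k, n):
--     answer = []
--     if n == 0:
--         return [[]]
--     subanswer = get_arrs(k, n-1)
--     for num in range(1, k+1):
--         for sublist in subanswer:
--             answer.append([num] + sublist)
--     return answer
-- ===== SOURCE B (Python) =====
-- def get_arrs(k, n):
--     result = [[]]
--     for _ in range(n):
--         result = [prev + [num] for prev in result for num in range(1, k + 1)]
--     return result
-- ===== Notes on version B (the rewrite author's own statement) =====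
-- stated objective: simpler
-- what changed: Replaces the n-deep recursion that prepends each new digit onto the recursive sublists with an iterative product build that starts from [[]] and appends one digit per pass, yielding the same lexicographic order.
import Mathlib
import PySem

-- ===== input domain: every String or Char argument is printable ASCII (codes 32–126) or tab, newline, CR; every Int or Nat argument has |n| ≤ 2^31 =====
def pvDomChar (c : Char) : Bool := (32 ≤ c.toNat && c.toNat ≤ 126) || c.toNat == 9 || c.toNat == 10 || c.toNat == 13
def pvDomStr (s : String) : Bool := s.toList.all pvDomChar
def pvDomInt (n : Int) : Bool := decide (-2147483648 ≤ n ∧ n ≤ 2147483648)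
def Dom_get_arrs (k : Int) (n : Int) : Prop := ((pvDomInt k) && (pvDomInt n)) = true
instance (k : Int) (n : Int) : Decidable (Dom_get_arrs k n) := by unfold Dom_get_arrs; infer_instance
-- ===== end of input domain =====

-- B replaces A's n-deep recursion (prepend each new digit) with an iterative product
-- build appending one digit per pass: simpler, same lexicographic output.


-- ===== PORT A =====
-- A's recursion on n, run on the fuel n.toNat (Python A only terminates for n ≥ 0;
-- n < 0 is excluded by Pre_get_arrs).
def getArrsRec (k : Int) : Nat → List (List Int)
  | 0 => [[]]
  | m + 1 =>
    let subanswer := getArrsRec k m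
    (PySem.List.pyRange 1 (k + 1) 1).foldl
      (fun answer num =>
        subanswer.foldl (fun answer sublist => answer ++ [num :: sublist]) answer) []

def get_arrs (k : Int) (n : Int) : List (List Int) := getArrsRec k n.toNat

-- ===== PORT B =====
def get_arrs_alt (k : Int) (n : Int) : List (List Int) :=
  (List.range n.toNat).foldl
    (fun result _ =>
      result.flatMap (fun prev => (PySem.List.pyRange 1 (k + 1) 1).map (fun num => prev ++ [num])))
    [[]]

-- ===== PRECONDITION & SPEC =====
-- Pre_ excludes n < 0, on which Python A recurses without bound (RecursionError).
def Pre_get_arrs (k : Int) (n : Int) : Prop := 0 ≤ n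
instance (k : Int) (n : Int) : Decidable (Pre_get_arrs k n) := by unfold Pre_get_arrs; infer_instance
def pvWitness_get_arrs : Int × Int := (2, 2)

def Spec_get_arrs (k : Int) (n : Int) (out : List (List Int)) : Prop := out = get_arrs_alt k n
instance (k : Int) (n : Int) (out : List (List Int)) : Decidable (Spec_get_arrs k n out) := by unfold Spec_get_arrs; infer_instance

-- ===== CLAIM (what is proved, stated in full; the proofs are below) =====
def Claim_equal_get_arrs : Prop := ∀ (k : Int) (n : Int), Dom_get_arrs k n → Pre_get_arrs k n → Spec_get_arrs k n (get_arrs k n)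

-- ===== LEMMAS AND PROOFS =====

-- one append step of B
def stepB (k : Int) (X : List (List Int)) : List (List Int) :=
  X.flatMap (fun prev => (PySem.List.pyRange 1 (k + 1) 1).map (fun num => prev ++ [num]))

-- one prepend step of A
def stepA (k : Int) (X : List (List Int)) : List (List Int) :=
  (PySem.List.pyRange 1 (k + 1) 1).flatMap (fun num => X.map (fun sublist => num :: sublist))

theorem foldl_push {α β : Type} (h : α → β) (l : List α) (acc : List β) :
    l.foldl (fun a s => a ++ [h s]) acc = acc ++ l.map h := by
  induction l generalizing acc with
  | nil => simp
  | cons x xs ih => simp [List.foldl, ih]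

theorem outer_fold (sub : List (List Int)) (l : List Int) (acc : List (List Int)) :
    l.foldl (fun answer num => sub.foldl (fun a s => a ++ [num :: s]) answer) acc
      = acc ++ l.flatMap (fun num => sub.map (fun s => num :: s)) := by
  induction l generalizing acc with
  | nil => simp
  | cons x xs ih => rw [List.foldl_cons, ih, foldl_push]; simp

theorem getArrsRec_succ (k : Int) (m : Nat) :
    getArrsRec k (m + 1) = stepA k (getArrsRec k m) := by
  show ((PySem.List.pyRange 1 (k + 1) 1).foldl
      (fun answer num =>
        (getArrsRec k m).foldl (fun answer sublist => answer ++ [num :: sublist]) answer) [])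
    = stepA k (getArrsRec k m)
  rw [outer_fold]; rfl

theorem stepA_stepB_comm (k : Int) (X : List (List Int)) :
    stepA k (stepB k X) = stepB k (stepA k X) := by
  simp [stepA, stepB, List.map_flatMap, List.flatMap_map, List.map_map, List.flatMap_assoc,
    Function.comp_def]

-- B's fold over range m is m iterations of stepB
def stepBIter (k : Int) : Nat → List (List Int)
  | 0 => [[]]
  | m + 1 => stepB k (stepBIter k m)

theorem alt_eq_iter (k : Int) (m : Nat) :
    (List.range m).foldl
      (fun result _ =>
        result.flatMap (fun prev => (PySem.List.pyRange 1 (k + 1) 1).map (fun num => prev ++ [num])))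
      [[]] = stepBIter k m := by
  induction m with
  | zero => rfl
  | succ m ih => rw [List.range_succ, List.foldl_append, ih]; rfl

theorem stepA_iter_comm (k : Int) (m : Nat) :
    stepA k (stepBIter k m) = stepB k (stepBIter k m) := by
  induction m with
  | zero =>
    simp only [stepA, stepB, stepBIter, List.flatMap_cons, List.map_cons, List.map_nil,
      List.flatMap_nil, List.append_nil]
    induction PySem.List.pyRange 1 (k + 1) 1 with
    | nil => rfl
    | cons x xs ih => simp [ih]
  | succ m ih =>
    show stepA k (stepB k (stepBIter k m)) = stepB k (stepB k (stepBIter k m))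
    rw [stepA_stepB_comm, ih]

theorem rec_eq_iter (k : Int) (m : Nat) : getArrsRec k m = stepBIter k m := by
  induction m with
  | zero => rfl
  | succ m ih =>
    rw [getArrsRec_succ, ih, stepA_iter_comm]
    rfl

-- ===== VERDICT (by name: the statement is the Claim_ definition above) =====
theorem get_arrs_spec : Claim_equal_get_arrs := by
  intro k n _ _
  show get_arrs k n = get_arrs_alt k n
  unfold get_arrs get_arrs_alt
  rw [rec_eq_iter, alt_eq_iter]
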